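-- pv_equiv track=rewrite | github.com/AndreyMaksimov/ae__200_problems_cpp | bin/CreateProblemTemplate.py | create_module_name
-- ===== SOURCE A (Python) =====
-- def create_module_name(problem_name: str) -> str:
--     """
--     Replace dash separated words by capitalized ones
--     Example:
--     'that-is-problem' -> 'ThatIsProblem'
--     :param problem_name: example 'that-is-problem'
--     :return: example 'ThatIsProblem'
--     """
--     to_upper = True
--     mn_result = ''
--     for ch in problem_name:
--         if ch == '-':
--             to_upper = True
--             continue
--         if to_upper:
--             ch = ch.upper()
--             to_upper = False
--         mn_result += ch
--     return mn_result
-- ===== SOURCE B (Python) =====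
-- def create_module_name(problem_name: str) -> str:
--     """Split on '-' and rebuild with each word's first character uppercased."""
--     return ''.join(w[:1].upper() + w[1:] for w in problem_name.split('-'))
-- ===== Notes on version B (the rewrite author's own statement) =====
-- stated objective: idiomatic
-- what changed: Replaces the character-by-character loop with a to_upper flag and string accumulator by a split on the dash separator followed by a join of each word with its first character uppercased. (''.join builds the result once instead of repeated += concatenation)
import Mathlib
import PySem

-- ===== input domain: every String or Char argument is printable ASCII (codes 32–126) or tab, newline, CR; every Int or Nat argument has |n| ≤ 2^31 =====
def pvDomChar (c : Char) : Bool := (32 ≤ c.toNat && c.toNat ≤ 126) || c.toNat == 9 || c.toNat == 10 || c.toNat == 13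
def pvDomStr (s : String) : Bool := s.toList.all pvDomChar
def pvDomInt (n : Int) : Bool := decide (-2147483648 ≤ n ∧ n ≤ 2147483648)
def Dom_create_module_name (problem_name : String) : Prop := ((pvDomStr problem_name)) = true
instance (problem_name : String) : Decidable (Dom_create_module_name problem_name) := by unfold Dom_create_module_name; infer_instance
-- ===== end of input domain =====

-- B replaces A's character loop with an idiomatic split-on-dash / join-with-first-char-uppercased; return value proved equal.


-- ===== PORT A =====
-- A's for-loop over the characters, carrying the (to_upper, mn_result) state
def cmnLoopA : List Char → Bool → List Char → List Char
  | [], _, acc => acc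
  | c :: cs, up, acc =>
    if c = '-' then cmnLoopA cs true acc
    else if up then cmnLoopA cs false (acc ++ PySem.Chars.upper [c])
    else cmnLoopA cs up (acc ++ [c])

def create_module_name (problem_name : String) : String :=
  String.ofList (cmnLoopA problem_name.toList true [])

-- ===== PORT B =====
-- w[:1].upper() + w[1:]
def cmnCapWord (w : List Char) : List Char :=
  PySem.Chars.upper (List.take 1 w) ++ List.drop 1 w

-- problem_name.split('-') ported as List.splitOn '-' (exact for a one-char separator); ''.join = flatten
def create_module_name_alt (problem_name : String) : String :=
  String.ofList (((problem_name.toList.splitOn '-').map cmnCapWord).flatten)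

-- ===== PRECONDITION & SPEC =====
def Spec_create_module_name (problem_name : String) (out : String) : Prop := out = create_module_name_alt problem_name
instance (problem_name : String) (out : String) : Decidable (Spec_create_module_name problem_name out) := by unfold Spec_create_module_name; infer_instance

-- ===== CLAIM (what is proved, stated in full; the proofs are below) =====
def Claim_equal_create_module_name : Prop := ∀ (problem_name : String), Dom_create_module_name problem_name → Spec_create_module_name problem_name (create_module_name problem_name)

-- ===== LEMMAS AND PROOFS =====
theorem cmnLoopA_acc (cs : List Char) (up : Bool) (acc : List Char) :
    cmnLoopA cs up acc = acc ++ cmnLoopA cs up [] := by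
  induction cs generalizing up acc with
  | nil => simp [cmnLoopA]
  | cons c cs ih =>
    simp only [cmnLoopA]
    split_ifs with h1 h2
    · exact ih _ _
    · rw [ih _ (acc ++ _), ih _ ([] ++ PySem.Chars.upper [c])]; simp
    · rw [ih _ (acc ++ _), ih _ ([] ++ [c])]; simp

theorem cmnLoopA_splitOn (cs : List Char) :
    cmnLoopA cs true [] = ((cs.splitOn '-').map cmnCapWord).flatten ∧
    cmnLoopA cs false [] =
      (cs.splitOn '-').headI ++ (((cs.splitOn '-').tail).map cmnCapWord).flatten := by
  induction cs with
  | nil => simp [cmnLoopA, List.splitOn, List.splitOnP_nil, cmnCapWord, PySem.Chars.upper]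
  | cons c cs ih =>
    obtain ⟨ih1, ih2⟩ := ih
    obtain ⟨w, ws, hS⟩ := List.exists_cons_of_ne_nil
      (show List.splitOn '-' cs ≠ [] from List.splitOnP_ne_nil _ _)
    by_cases h : c = '-'
    · have key : List.splitOn '-' (c :: cs) = [] :: w :: ws := by
        subst h; simp [List.splitOn, List.splitOnP_cons, ← hS]
      rw [key]
      subst h
      simp only [cmnLoopA, List.map_cons, List.flatten_cons, List.headI, List.tail]
      rw [ih1, hS]
      simp [cmnCapWord, PySem.Chars.upper]
    · have hb : (c == '-') = false := by simp [h]
      have hS' : List.splitOnP (fun x => x == '-') cs = w :: ws := hS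
      have key : List.splitOn '-' (c :: cs) = (c :: w) :: ws := by
        simp [List.splitOn, List.splitOnP_cons, hb, hS']
      rw [key]
      simp only [cmnLoopA, if_neg h, if_true, Bool.false_eq_true, if_false,
        List.map_cons, List.flatten_cons, List.headI, List.tail]
      constructor
      · rw [cmnLoopA_acc, ih2, hS]
        simp [cmnCapWord, PySem.Chars.upper, List.headI, List.tail]
      · rw [cmnLoopA_acc, ih2, hS]
        simp [List.headI, List.tail]

-- ===== VERDICT =====
theorem create_module_name_spec : Claim_equal_create_module_name := by
  intro s _
  unfold Spec_create_module_name create_module_name create_module_name_alt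
  rw [(cmnLoopA_splitOn s.toList).1]
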